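-- pv_equiv track=rewrite | github.com/dfielding14/clump_finder | tests/test_equivalence_no_mpi.py | _split_axis
-- ===== SOURCE A (Python) =====
-- from typing import Tuple
--
-- def _split_axis(n: int, p: int) -> list[Tuple[int, int]]:
--     base, rem = divmod(n, p)
--     s = 0
--     out = []
--     for c in range(p):
--         extra = 1 if c < rem else 0
--         e = s + base + extra
--         out.append((s, e))
--         s = e
--     return out
-- ===== SOURCE B (Python) =====
-- from typing import Tuple
--
-- def _split_axis(n: int, p: int) -> list[Tuple[int, int]]:
--     base, rem = divmod(n, p)
--     def boundary(c: int) -> int: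
--         return c * base + min(c, rem)
--     return [(boundary(c), boundary(c + 1)) for c in range(p)]
-- ===== Notes on version B (the rewrite author's own statement) =====
-- stated objective: alternative
-- what changed: The loop-carried running end accumulator s is replaced by a stateless closed-form boundary(c) = c*base + min(c, rem), so each interval is computed directly from its index.
import Mathlib
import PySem

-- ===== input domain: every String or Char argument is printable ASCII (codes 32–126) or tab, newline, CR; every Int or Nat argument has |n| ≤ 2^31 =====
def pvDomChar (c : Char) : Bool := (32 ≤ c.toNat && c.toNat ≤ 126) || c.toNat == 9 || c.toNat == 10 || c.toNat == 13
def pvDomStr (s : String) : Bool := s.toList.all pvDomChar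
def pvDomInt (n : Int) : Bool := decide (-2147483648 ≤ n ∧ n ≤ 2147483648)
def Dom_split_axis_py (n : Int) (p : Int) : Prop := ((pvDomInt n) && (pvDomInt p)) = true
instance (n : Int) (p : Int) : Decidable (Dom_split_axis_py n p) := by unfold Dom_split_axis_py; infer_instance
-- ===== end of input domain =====

-- B replaces A's loop-carried running end `s` by the stateless closed form
-- boundary(c) = c*base + min(c, rem); same outputs, same O(p) cost ("alternative").

-- ===== PORT A =====
def split_axis_py (n : Int) (p : Int) : List (Int × Int) :=
  match PySem.Int.divmod? n p with
  | none => []   -- ZeroDivisionError (p = 0), excluded by Pre_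
  | some (base, rem) =>
    ((PySem.List.pyRange 0 p 1).foldl
      (fun (st : Int × List (Int × Int)) c =>
        let extra : Int := if c < rem then 1 else 0
        let e := st.1 + base + extra
        (e, st.2 ++ [(st.1, e)]))
      (0, [])).2

-- ===== PORT B =====
def split_axis_py_alt (n : Int) (p : Int) : List (Int × Int) :=
  match PySem.Int.divmod? n p with
  | none => []   -- ZeroDivisionError (p = 0), excluded by Pre_
  | some (base, rem) =>
    (PySem.List.pyRange 0 p 1).map
      (fun c => (c * base + min c rem, (c + 1) * base + min (c + 1) rem))

-- ===== PRECONDITION & SPEC =====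
-- Pre_ excludes exactly p = 0, where Python's divmod raises ZeroDivisionError.
def Pre_split_axis_py (n : Int) (p : Int) : Prop := p ≠ 0
instance (n : Int) (p : Int) : Decidable (Pre_split_axis_py n p) := by unfold Pre_split_axis_py; infer_instance
def pvWitness_split_axis_py : Int × Int := (7, 3)

def Spec_split_axis_py (n : Int) (p : Int) (out : List (Int × Int)) : Prop := out = split_axis_py_alt n p
instance (n : Int) (p : Int) (out : List (Int × Int)) : Decidable (Spec_split_axis_py n p out) := by unfold Spec_split_axis_py; infer_instance

-- ===== CLAIM (what is proved, stated in full; the proofs are below) =====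
def Claim_equal_split_axis_py : Prop := ∀ (n : Int) (p : Int), Dom_split_axis_py n p → Pre_split_axis_py n p → Spec_split_axis_py n p (split_axis_py n p)

-- ===== LEMMAS AND PROOFS =====

-- Loop invariant: after folding over range(k), the running end equals the closed
-- form boundary(k) and the accumulated list equals B's map over range(k).
theorem split_axis_fold_inv (base rem : Int) (hrem : 0 ≤ rem) (k : Nat) :
    (PySem.List.pyRange 0 (k : Int) 1).foldl
      (fun (st : Int × List (Int × Int)) c =>
        let extra : Int := if c < rem then 1 else 0
        let e := st.1 + base + extra
        (e, st.2 ++ [(st.1, e)]))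
      (0, [])
    = ((k : Int) * base + min (k : Int) rem,
       (PySem.List.pyRange 0 (k : Int) 1).map
         (fun c => (c * base + min c rem, (c + 1) * base + min (c + 1) rem))) := by
  induction k with
  | zero =>
    rw [PySem.List.pyRange_one_eq_nil (by norm_num)]
    simp
    omega
  | succ k ih =>
    have hsplit : PySem.List.pyRange 0 ((k + 1 : Nat) : Int) 1
        = PySem.List.pyRange 0 (k : Int) 1 ++ [(k : Int)] := by
      push_cast
      exact PySem.List.pyRange_one_succ_right (by positivity)
    rw [hsplit, List.foldl_append, ih, List.map_append]
    simp only [List.foldl_cons, List.foldl_nil, List.map_cons, List.map_nil]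
    have hmin : min ((k : Int) + 1) rem = min (k : Int) rem + (if (k : Int) < rem then 1 else 0) := by
      split_ifs <;> omega
    push_cast
    rw [Prod.mk.injEq]
    refine ⟨by rw [hmin]; ring, ?_⟩
    congr 1
    simp only [List.cons.injEq, Prod.mk.injEq, and_true]
    exact ⟨trivial, by rw [hmin]; ring⟩

-- ===== VERDICT (by name: the statement is the Claim_ definition above) =====
theorem split_axis_py_spec : Claim_equal_split_axis_py := by
  intro n p _ hp
  unfold Spec_split_axis_py split_axis_py split_axis_py_alt
  have hdm : PySem.Int.divmod? n p = some (PySem.Int.floordiv n p, PySem.Int.mod n p) := by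
    simp [PySem.Int.divmod?, PySem.Int.floordiv, PySem.Int.mod]
    exact hp
  rw [hdm]
  dsimp only
  rcases lt_trichotomy p 0 with hneg | hzero | hpos
  · rw [PySem.List.pyRange_one_eq_nil (by omega)]
    simp
  · exact absurd hzero hp
  · have hrem : 0 ≤ PySem.Int.mod n p := by
      rw [PySem.Int.mod_eq_emod_of_pos hpos]
      exact Int.emod_nonneg n hp
    have hk : ((p.toNat : Nat) : Int) = p := Int.toNat_of_nonneg (le_of_lt hpos)
    have := split_axis_fold_inv (PySem.Int.floordiv n p) (PySem.Int.mod n p) hrem p.toNat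
    rw [hk] at this
    rw [this]
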